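-- pv_equiv track=rewrite | github.com/AbhaySingh989/TelegramBot | utils.py | reverse_alphabet
-- ===== SOURCE A (Python) =====
-- def reverse_alphabet(text: str) -> str:
--     """Reverses the alphabet of each letter in a string, leaving non-alphabetic characters untouched.
--
--     Args:
--         text: The input string.
--
--     Returns:
--         A new string with each letter replaced by its reverse alphabet counterpart.
--         For example, 'a' becomes 'z', 'b' becomes 'y', 'A' becomes 'Z', etc.
--     """
--     result = []
--     for char in text:
--         if 'a' <= char <= 'z':
--             # Calculate the reversed character for lowercase letters
--             reversed_char = chr(ord('a') + (ord('z') - ord(char)))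
--             result.append(reversed_char)
--         elif 'A' <= char <= 'Z':
--             # Calculate the reversed character for uppercase letters
--             reversed_char = chr(ord('A') + (ord('Z') - ord(char)))
--             result.append(reversed_char)
--         else:
--             # Keep non-alphabetic characters as they are
--             result.append(char)
--     return "".join(result)
-- ===== SOURCE B (Python) =====
-- _LOWER = "abcdefghijklmnopqrstuvwxyz"
-- _UPPER = _LOWER.upper()
--
--
-- def _mirror(s: str) -> str:
--     """Mirror a single-character string via positional lookup in the alphabet strings."""
--     i = _LOWER.find(s)
--     if i != -1:
--         return _LOWER[25 - i]
--     j = _UPPER.find(s)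
--     if j != -1:
--         return _UPPER[25 - j]
--     return s
--
--
-- def reverse_alphabet(text: str) -> str:
--     """Divide-and-conquer: split the string in half, mirror each half, concatenate.
--
--     At the leaves a single character is mirrored by finding its position in the
--     alphabet string and indexing the symmetric position (25 - i); no ord/chr
--     arithmetic and no left-to-right accumulator loop.
--     """
--     if len(text) <= 1:
--         return _mirror(text) if text else text
--     mid = len(text) // 2
--     return reverse_alphabet(text[:mid]) + reverse_alphabet(text[mid:])
-- ===== Notes on version B (the rewrite author's own statement) =====
-- stated objective: alternative
-- what changed: Replaces A's left-to-right accumulator loop with ord/chr arithmetic by a divide-and-conquer recursion that splits the string in half and, at single-character leaves, mirrors a letter by positional lookup (str.find and index 25-i) in the alphabet strings.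
import Mathlib
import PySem

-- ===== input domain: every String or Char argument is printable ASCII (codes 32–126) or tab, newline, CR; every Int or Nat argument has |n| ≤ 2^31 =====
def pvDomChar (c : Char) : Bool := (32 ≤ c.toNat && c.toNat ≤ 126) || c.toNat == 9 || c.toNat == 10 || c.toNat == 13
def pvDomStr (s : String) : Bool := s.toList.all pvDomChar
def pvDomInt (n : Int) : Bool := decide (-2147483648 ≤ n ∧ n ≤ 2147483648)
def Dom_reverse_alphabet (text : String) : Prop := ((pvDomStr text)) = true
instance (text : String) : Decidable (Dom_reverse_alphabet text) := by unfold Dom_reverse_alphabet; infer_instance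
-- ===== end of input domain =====

-- B replaces A's accumulator loop and ord/chr arithmetic by a divide-and-conquer
-- recursion on string halves with positional lookup (str.find, index 25-i) at the leaves.


-- ===== PORT A =====
def reverse_alphabet (text : String) : String :=
  String.mk (text.toList.foldl (fun res c =>
    if 'a' ≤ c ∧ c ≤ 'z' then
      res ++ [Char.ofNat ('a'.toNat + ('z'.toNat - c.toNat))]
    else if 'A' ≤ c ∧ c ≤ 'Z' then
      res ++ [Char.ofNat ('A'.toNat + ('Z'.toNat - c.toNat))]
    else
      res ++ [c]) [])

-- ===== PORT B =====
def pvLower : String := "abcdefghijklmnopqrstuvwxyz"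
def pvUpper : String := PySem.Str.upper pvLower

-- _mirror: single-character string, mirrored by position in the alphabet strings.
-- Python's LOWER[25-i] with i ∈ [0,25] always succeeds; the Option default (return s) is a totality guard only.
def pvMirror (s : String) : String :=
  let i := PySem.Str.find pvLower s
  if i ≠ -1 then
    match PySem.Str.pyGet? pvLower (25 - i) with
    | some c => String.mk [c]
    | none => s
  else
    let j := PySem.Str.find pvUpper s
    if j ≠ -1 then
      match PySem.Str.pyGet? pvUpper (25 - j) with
      | some c => String.mk [c]
      | none => s
    else s

-- the divide-and-conquer body over the code points (text[:mid] / text[mid:] = take / drop)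
def pvRevDC (l : List Char) : List Char :=
  if h : l.length ≤ 1 then
    match l with
    | [] => []
    | _ => (pvMirror (String.mk l)).toList
  else
    let mid := l.length / 2
    pvRevDC (l.take mid) ++ pvRevDC (l.drop mid)
termination_by l.length
decreasing_by
  · simp only [List.length_take]; omega
  · simp only [List.length_drop]; omega

def reverse_alphabet_alt (text : String) : String :=
  String.mk (pvRevDC text.toList)

-- ===== PRECONDITION & SPEC =====
def Spec_reverse_alphabet (text : String) (out : String) : Prop := out = reverse_alphabet_alt text
instance (text : String) (out : String) : Decidable (Spec_reverse_alphabet text out) := by unfold Spec_reverse_alphabet; infer_instance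

-- ===== CLAIM =====
def Claim_equal_reverse_alphabet : Prop := ∀ (text : String), Dom_reverse_alphabet text → Spec_reverse_alphabet text (reverse_alphabet text)

-- ===== LEMMAS AND PROOFS =====

-- A's per-character mapping, extracted
def pvAchar (c : Char) : Char :=
  if 'a' ≤ c ∧ c ≤ 'z' then Char.ofNat ('a'.toNat + ('z'.toNat - c.toNat))
  else if 'A' ≤ c ∧ c ≤ 'Z' then Char.ofNat ('A'.toNat + ('Z'.toNat - c.toNat))
  else c

theorem foldl_pvAchar (l : List Char) (acc : List Char) :
    l.foldl (fun res c =>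
      if 'a' ≤ c ∧ c ≤ 'z' then res ++ [Char.ofNat ('a'.toNat + ('z'.toNat - c.toNat))]
      else if 'A' ≤ c ∧ c ≤ 'Z' then res ++ [Char.ofNat ('A'.toNat + ('Z'.toNat - c.toNat))]
      else res ++ [c]) acc = acc ++ l.map pvAchar := by
  induction l generalizing acc with
  | nil => simp
  | cons x xs ih =>
    simp only [List.foldl_cons, List.map_cons, ih, pvAchar]
    split_ifs <;> simp

set_option maxRecDepth 100000 in
theorem pvMirror_single_small : ∀ n : Fin 127,
    (pvMirror (String.mk [Char.ofNat n])).toList = [pvAchar (Char.ofNat n)] := by decide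

theorem pvMirror_single (c : Char) (h : pvDomChar c = true) :
    (pvMirror (String.mk [c])).toList = [pvAchar c] := by
  have hlt : c.toNat < 127 := by
    simp only [pvDomChar, Bool.or_eq_true, Bool.and_eq_true, decide_eq_true_eq,
      beq_iff_eq] at h
    omega
  have := pvMirror_single_small ⟨c.toNat, hlt⟩
  simpa [Char.ofNat_toNat] using this

theorem pvRevDC_eq_map : ∀ (n : Nat) (l : List Char), l.length = n →
    (∀ c ∈ l, pvDomChar c = true) → pvRevDC l = l.map pvAchar := by
  intro n
  induction n using Nat.strong_induction_on with
  | _ n ih =>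
    intro l hl hdom
    unfold pvRevDC
    split
    · next hle =>
      match l with
      | [] => simp
      | [c] =>
        simpa using pvMirror_single c (hdom c (by simp))
      | a :: b :: t => simp at hle
    · next hgt =>
      have h2 : 2 ≤ l.length := by omega
      have hmid1 : (l.take (l.length / 2)).length < n := by
        simp only [List.length_take]; omega
      have hmid2 : (l.drop (l.length / 2)).length < n := by
        simp only [List.length_drop]; omega
      show pvRevDC (l.take (l.length / 2)) ++ pvRevDC (l.drop (l.length / 2)) = _
      rw [ih _ hmid1 _ rfl (fun c hc => hdom c (List.mem_of_mem_take hc)),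
          ih _ hmid2 _ rfl (fun c hc => hdom c (List.mem_of_mem_drop hc)),
          ← List.map_append, List.take_append_drop]

-- ===== VERDICT =====
theorem reverse_alphabet_spec : Claim_equal_reverse_alphabet := by
  intro text hdom
  unfold Spec_reverse_alphabet reverse_alphabet reverse_alphabet_alt
  rw [foldl_pvAchar, pvRevDC_eq_map text.toList.length text.toList rfl]
  · simp
  · intro c hc
    exact (List.all_eq_true.mp hdom) c hc
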